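-- pv_equiv track=rewrite | github.com/smartbooty69/MCA-2024-2026 | Semester II/Natural Language Processing/Prog05/Prog05.py | suggest_correction
-- ===== SOURCE A (Python) =====
-- def suggest_correction(sentence):
--     """
--     Suggest corrections for invalid sentences.
--
--     Args:
--         sentence (str): The sentence to analyze.
--
--     Returns:
--         str: Suggested correction or feedback.
--     """
--
--     tokens = sentence.lower().split()
--     if len(tokens) < 3:
--         return "Sentence is too short. Try adding more words."
--     if tokens[0] not in ['the', 'a', 'an']:
--         return "Consider starting with a determiner like 'the', 'a', or 'an'."
--     if ' ' not in sentence: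
--         return "Make sure to include spaces between words."
--     if not any(token in tokens for token in ['saw', 'walked', 'ran', 'chased', 'likes', 'hates']):
--         return "Try using a verb like 'saw', 'walked', or 'likes' to make your sentence complete."
--     if not any(token in tokens for token in ['quickly', 'silently', 'happily', 'sadly']):
--         return "Consider adding an adverb to provide more detail."
--     return "The sentence structure seems incorrect. Try rephrasing."
-- ===== SOURCE B (Python) =====
-- VERBS = {'saw', 'walked', 'ran', 'chased', 'likes', 'hates'}
-- ADVERBS = {'quickly', 'silently', 'happily', 'sadly'}
--
-- def suggest_correction(sentence):
--     """Single-pass rewrite: one loop over the tokens accumulates the word count,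
--     the first token and verb/adverb flags, then a small decision tree picks the
--     message (instead of A's staged membership scans in an early-return chain)."""
--     n = 0
--     first = None
--     has_verb = False
--     has_adverb = False
--     for tok in sentence.lower().split():
--         if first is None:
--             first = tok
--         n += 1
--         if tok in VERBS:
--             has_verb = True
--         elif tok in ADVERBS:
--             has_adverb = True
--     if n >= 3 and first in ('the', 'a', 'an'):
--         if ' ' not in sentence:
--             return "Make sure to include spaces between words."
--         if has_verb:
--             if has_adverb:
--                 return "The sentence structure seems incorrect. Try rephrasing."
--             return "Consider adding an adverb to provide more detail."
--         return "Try using a verb like 'saw', 'walked', or 'likes' to make your sentence complete."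
--     if n < 3:
--         return "Sentence is too short. Try adding more words."
--     return "Consider starting with a determiner like 'the', 'a', or 'an'."
-- ===== Notes on version B (the rewrite author's own statement) =====
-- stated objective: alternative
-- what changed: A makes staged passes (length check, then a verb-list membership scan, then an adverb-list scan) in an early-return chain; B makes one accumulator pass over the tokens collecting count, first token and verb/adverb flags, then selects the message with a nested decision tree.
import Mathlib
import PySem

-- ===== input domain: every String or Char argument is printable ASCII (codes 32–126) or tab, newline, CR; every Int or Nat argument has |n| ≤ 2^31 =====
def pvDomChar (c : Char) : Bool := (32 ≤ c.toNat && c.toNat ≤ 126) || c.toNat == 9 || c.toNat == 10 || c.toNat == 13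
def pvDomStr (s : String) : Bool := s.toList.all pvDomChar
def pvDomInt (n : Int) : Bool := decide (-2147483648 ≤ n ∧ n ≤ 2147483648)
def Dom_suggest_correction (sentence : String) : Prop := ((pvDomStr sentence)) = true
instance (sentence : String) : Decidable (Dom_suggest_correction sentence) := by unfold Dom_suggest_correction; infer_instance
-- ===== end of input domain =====

-- B replaces A's early-return chain of staged membership scans by one accumulator
-- pass over the tokens plus a decision tree; return values only, no mutation.

-- ===== PORT A =====
def suggest_correction (sentence : String) : String :=
  let tokens := PySem.Str.split₀ (PySem.Str.lower sentence)
  if tokens.length < 3 then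
    "Sentence is too short. Try adding more words."
  else if !(["the", "a", "an"].contains (PySem.List.pyGetD tokens 0 "")) then
    "Consider starting with a determiner like 'the', 'a', or 'an'."
  else if !(PySem.Str.isIn " " sentence) then
    "Make sure to include spaces between words."
  else if !(["saw", "walked", "ran", "chased", "likes", "hates"].any (fun t => tokens.contains t)) then
    "Try using a verb like 'saw', 'walked', or 'likes' to make your sentence complete."
  else if !(["quickly", "silently", "happily", "sadly"].any (fun t => tokens.contains t)) then
    "Consider adding an adverb to provide more detail."
  else
    "The sentence structure seems incorrect. Try rephrasing."

-- ===== PORT B =====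
-- the loop body of B's single pass: state = (count, first token, has_verb, has_adverb)
def scStep (st : Nat × Option String × Bool × Bool) (tok : String) :
    Nat × Option String × Bool × Bool :=
  match st with
  | (n, first, hv, hav) =>
    (n + 1,
     (match first with | none => some tok | some f => some f),
     hv || ["saw", "walked", "ran", "chased", "likes", "hates"].contains tok,
     if ["saw", "walked", "ran", "chased", "likes", "hates"].contains tok then hav
     else hav || ["quickly", "silently", "happily", "sadly"].contains tok)

def suggest_correction_alt (sentence : String) : String :=
  let st := (PySem.Str.split₀ (PySem.Str.lower sentence)).foldl scStep (0, none, false, false)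
  match st with
  | (n, first, hv, hav) =>
    if 3 ≤ n && (match first with
                 | some f => ["the", "a", "an"].contains f
                 | none => false) then
      if !(PySem.Str.isIn " " sentence) then
        "Make sure to include spaces between words."
      else if hv then
        if hav then "The sentence structure seems incorrect. Try rephrasing."
        else "Consider adding an adverb to provide more detail."
      else
        "Try using a verb like 'saw', 'walked', or 'likes' to make your sentence complete."
    else if n < 3 then
      "Sentence is too short. Try adding more words."
    else
      "Consider starting with a determiner like 'the', 'a', or 'an'."

-- ===== PRECONDITION & SPEC =====
def Spec_suggest_correction (sentence : String) (out : String) : Prop := out = suggest_correction_alt sentence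
instance (sentence : String) (out : String) : Decidable (Spec_suggest_correction sentence out) := by unfold Spec_suggest_correction; infer_instance

-- ===== CLAIM (what is proved, stated in full; the proofs are below) =====
def Claim_equal_suggest_correction : Prop := ∀ (sentence : String), Dom_suggest_correction sentence → Spec_suggest_correction sentence (suggest_correction sentence)

-- ===== LEMMAS AND PROOFS =====

-- characterisation of B's accumulator pass
lemma scStep_foldl (tokens : List String) (n : Nat) (first : Option String) (hv hav : Bool) :
    tokens.foldl scStep (n, first, hv, hav) =
      (n + tokens.length,
       (match first with | none => tokens.head? | some f => some f),
       hv || tokens.any (fun t => ["saw", "walked", "ran", "chased", "likes", "hates"].contains t),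
       hav || tokens.any (fun t =>
         !(["saw", "walked", "ran", "chased", "likes", "hates"].contains t) &&
         ["quickly", "silently", "happily", "sadly"].contains t)) := by
  induction tokens generalizing n first hv hav with
  | nil => cases first <;> simp
  | cons t ts ih =>
    simp only [List.foldl_cons, scStep, ih, List.length_cons, List.any_cons, List.head?_cons]
    cases first <;> cases hV : ["saw", "walked", "ran", "chased", "likes", "hates"].contains t <;>
      simp [Bool.or_assoc] <;> omega

-- a token in the adverb list is never in the verb list
lemma adv_not_verb (t : String) :
    (!(["saw", "walked", "ran", "chased", "likes", "hates"].contains t) &&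
      ["quickly", "silently", "happily", "sadly"].contains t)
      = ["quickly", "silently", "happily", "sadly"].contains t := by
  cases hA : ["quickly", "silently", "happily", "sadly"].contains t
  · simp
  · have : t = "quickly" ∨ t = "silently" ∨ t = "happily" ∨ t = "sadly" := by
      simpa [List.contains_eq_mem] using hA
    rcases this with h | h | h | h <;> subst h <;> decide

-- over any token list the restricted adverb scan equals the plain adverb scan
lemma any_adv (tokens : List String) :
    tokens.any (fun t =>
      !(["saw", "walked", "ran", "chased", "likes", "hates"].contains t) &&
      ["quickly", "silently", "happily", "sadly"].contains t)
    = tokens.any (fun t => ["quickly", "silently", "happily", "sadly"].contains t) := by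
  induction tokens with
  | nil => rfl
  | cons t ts ih => simp only [List.any_cons, adv_not_verb]

-- the two directions of the membership scan agree
lemma any_comm (ws tokens : List String) :
    tokens.any (fun t => ws.contains t) = ws.any (fun t => tokens.contains t) := by
  rw [Bool.eq_iff_iff]
  simp [List.any_eq_true, List.contains_eq_mem]
  tauto

-- A's early-return chain and B's decision tree agree for any values of the five conditions
lemma chain_eq (len : Nat) (det sp v adv : Bool) (S D Sp Vm Am R : String) :
    (if len < 3 then S
     else if !det then D
     else if !sp then Sp
     else if !v then Vm
     else if !adv then Am
     else R)
    = (if 3 ≤ len && det then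
         (if !sp then Sp else if v then (if adv then R else Am) else Vm)
       else if len < 3 then S
       else D) := by
  by_cases h : len < 3
  · have h2 : ¬ 3 ≤ len := by omega
    cases det <;> simp [h, h2]
  · have h2 : 3 ≤ len := by omega
    cases det <;> cases sp <;> cases v <;> cases adv <;> simp [h, h2]

-- ===== VERDICT (by name: the statement is the Claim_ definition above) =====
theorem suggest_correction_spec : Claim_equal_suggest_correction := by
  intro sentence _
  unfold Spec_suggest_correction suggest_correction suggest_correction_alt
  simp only [scStep_foldl, Nat.zero_add]
  cases htok : PySem.Str.split₀ (PySem.Str.lower sentence) with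
  | nil => simp
  | cons t ts =>
    have hget : PySem.List.pyGetD (t :: ts) 0 "" = t := by
      simp [PySem.List.pyGetD, PySem.List.pyGet?, PySem.List.pyIdx?]
    simp only [List.head?_cons, hget, any_adv, any_comm, Bool.false_or]
    exact chain_eq (t :: ts).length _ _ _ _ _ _ _ _ _ _
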